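-- pv_equiv track=rewrite | github.com/hippolytemayard/yolov11-pytorch | scripts/download_weights.py | get_models_to_download
-- ===== SOURCE A (Python) =====
-- WEIGHT_FILES = {
--     # Detection
--     "yolo11n.pt": "175qOxekoJwXiNhE16Bo2iQr7IJPk4H-E",
--     "yolo11s.pt": "1SA5N8BJulqPkMKaKnxP6fqJpENqvioc4",
--     "yolo11m.pt": "1NpDLZjFCqMY8iM5812kSmHB04iiOYFkG",
--     "yolo11l.pt": "1xWeN__ST4zio6O3efMHO6qBz-oIyyifo",
--     "yolo11x.pt": "1NBHmAiMypj-KGHoN5GiIJtPF9h5XDQzq",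
--     # Segmentation
--     "yolo11n-seg.pt": "1mUCOkkuGwS5ZVmCTx04OhVvQY9f31A1v",
--     "yolo11s-seg.pt": "1xsJdQV2-IwwEeBFcgfSFmizxQGgZSF1k",
--     "yolo11m-seg.pt": "1_U7fgSdK8ydWiWB2MJbN4hxcAc1x78b7",
--     "yolo11l-seg.pt": "14uOrXi_1kmnTn-rWUXaVI1w20UdvjDID",
--     "yolo11x-seg.pt": "1USVdODYo7_5bgik74-20tAhFWCdWM9Xm",
--     # Pose
--     "yolo11n-pose.pt": "1pJDTaHdbiJO_uHLeIDpwJt9WFfASsai9",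
--     "yolo11s-pose.pt": "1q4_hWMm0wMfQX4UsfDku80_tUyVjS9Gg",
--     "yolo11m-pose.pt": "1LkUAZsyN8H1UsB51AWMJwUrEqjVTxS_8",
--     "yolo11l-pose.pt": "1rWar9FvvI4KtYnFdGZT8FWu2hoF_Yzc9",
--     "yolo11x-pose.pt": "1kgcjABj-QUl9eJbtYnNDwcDGoq5kGTLO",
-- }
--
-- MODELS_BY_TASK = {
--     "detect": ["yolo11n", "yolo11s", "yolo11m", "yolo11l", "yolo11x"],
--     "segment": ["yolo11n-seg", "yolo11s-seg", "yolo11m-seg", "yolo11l-seg", "yolo11x-seg"],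
--     "pose": ["yolo11n-pose", "yolo11s-pose", "yolo11m-pose", "yolo11l-pose", "yolo11x-pose"],
-- }
--
-- MODELS_BY_SIZE = {
--     "n": ["yolo11n", "yolo11n-seg", "yolo11n-pose"],
--     "s": ["yolo11s", "yolo11s-seg", "yolo11s-pose"],
--     "m": ["yolo11m", "yolo11m-seg", "yolo11m-pose"],
--     "l": ["yolo11l", "yolo11l-seg", "yolo11l-pose"],
--     "x": ["yolo11x", "yolo11x-seg", "yolo11x-pose"],
-- }
--
-- def get_models_to_download(sizes: list = None, tasks: list = None) -> list:
--     """Get list of models to download based on filters."""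
--     models = set()
--
--     # If no filters, download all
--     if not sizes and not tasks:
--         return [m.replace(".pt", "") for m in WEIGHT_FILES.keys()]
--
--     # Filter by size
--     if sizes:
--         for size in sizes:
--             models.update(MODELS_BY_SIZE.get(size, []))
--
--     # Filter by task
--     if tasks:
--         task_models = set()
--         for task in tasks:
--             task_models.update(MODELS_BY_TASK.get(task, []))
--
--         if sizes:
--             models = models.intersection(task_models)
--         else:
--             models = task_models
--
--     return sorted(list(models))
-- ===== SOURCE B (Python) =====
-- WEIGHT_FILES = {
--     "yolo11n.pt": "175qOxekoJwXiNhE16Bo2iQr7IJPk4H-E",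
--     "yolo11s.pt": "1SA5N8BJulqPkMKaKnxP6fqJpENqvioc4",
--     "yolo11m.pt": "1NpDLZjFCqMY8iM5812kSmHB04iiOYFkG",
--     "yolo11l.pt": "1xWeN__ST4zio6O3efMHO6qBz-oIyyifo",
--     "yolo11x.pt": "1NBHmAiMypj-KGHoN5GiIJtPF9h5XDQzq",
--     "yolo11n-seg.pt": "1mUCOkkuGwS5ZVmCTx04OhVvQY9f31A1v",
--     "yolo11s-seg.pt": "1xsJdQV2-IwwEeBFcgfSFmizxQGgZSF1k",
--     "yolo11m-seg.pt": "1_U7fgSdK8ydWiWB2MJbN4hxcAc1x78b7",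
--     "yolo11l-seg.pt": "14uOrXi_1kmnTn-rWUXaVI1w20UdvjDID",
--     "yolo11x-seg.pt": "1USVdODYo7_5bgik74-20tAhFWCdWM9Xm",
--     "yolo11n-pose.pt": "1pJDTaHdbiJO_uHLeIDpwJt9WFfASsai9",
--     "yolo11s-pose.pt": "1q4_hWMm0wMfQX4UsfDku80_tUyVjS9Gg",
--     "yolo11m-pose.pt": "1LkUAZsyN8H1UsB51AWMJwUrEqjVTxS_8",
--     "yolo11l-pose.pt": "1rWar9FvvI4KtYnFdGZT8FWu2hoF_Yzc9",
--     "yolo11x-pose.pt": "1kgcjABj-QUl9eJbtYnNDwcDGoq5kGTLO",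
-- }
--
--
-- def _task_of(name):
--     if name.endswith("-seg"):
--         return "segment"
--     if name.endswith("-pose"):
--         return "pose"
--     return "detect"
--
--
-- def get_models_to_download(sizes: list = None, tasks: list = None) -> list:
--     """Get list of models to download based on filters."""
--     names = [k[:-3] for k in WEIGHT_FILES]
--     if not sizes and not tasks:
--         return names
--     picked = [
--         n
--         for n in names
--         if (not sizes or n[6:7] in sizes) and (not tasks or _task_of(n) in tasks)
--     ]
--     return sorted(picked)
-- ===== Notes on version B (the rewrite author's own statement) =====
-- stated objective: simpler
-- what changed: Instead of building size-union and task-union sets from the MODELS_BY_SIZE/MODELS_BY_TASK index tables and intersecting them, B makes one pass over the stripped weight-file names, deriving each model's size (the character after 'yolo11') and task (from its '-seg'/'-pose' suffix) and keeping the names that satisfy both filters, then sorts.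
import Mathlib
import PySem

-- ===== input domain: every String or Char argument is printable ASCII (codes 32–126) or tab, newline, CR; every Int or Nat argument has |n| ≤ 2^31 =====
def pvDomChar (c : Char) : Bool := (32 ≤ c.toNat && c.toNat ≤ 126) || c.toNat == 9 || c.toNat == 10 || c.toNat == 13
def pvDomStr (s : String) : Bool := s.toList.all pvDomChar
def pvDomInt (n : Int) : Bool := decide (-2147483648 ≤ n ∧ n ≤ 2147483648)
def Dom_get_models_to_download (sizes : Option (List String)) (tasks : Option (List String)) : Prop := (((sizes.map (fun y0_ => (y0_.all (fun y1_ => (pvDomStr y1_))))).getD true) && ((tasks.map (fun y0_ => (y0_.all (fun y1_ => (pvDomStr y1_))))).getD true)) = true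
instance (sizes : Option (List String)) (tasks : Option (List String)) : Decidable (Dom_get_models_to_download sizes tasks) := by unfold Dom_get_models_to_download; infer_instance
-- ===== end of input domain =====

-- B replaces A's size-union/task-union set algebra over the index tables by a single
-- filtering pass over the stripped weight-file names, deriving size and task from each name
-- (objective: simpler; same observable behaviour).

-- ===== PORT A =====
-- module constants (shared by both Pythons)
def pvWeightFiles : PySem.Dict String String := PySem.Dict.ofList [
  ("yolo11n.pt", "175qOxekoJwXiNhE16Bo2iQr7IJPk4H-E"),
  ("yolo11s.pt", "1SA5N8BJulqPkMKaKnxP6fqJpENqvioc4"),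
  ("yolo11m.pt", "1NpDLZjFCqMY8iM5812kSmHB04iiOYFkG"),
  ("yolo11l.pt", "1xWeN__ST4zio6O3efMHO6qBz-oIyyifo"),
  ("yolo11x.pt", "1NBHmAiMypj-KGHoN5GiIJtPF9h5XDQzq"),
  ("yolo11n-seg.pt", "1mUCOkkuGwS5ZVmCTx04OhVvQY9f31A1v"),
  ("yolo11s-seg.pt", "1xsJdQV2-IwwEeBFcgfSFmizxQGgZSF1k"),
  ("yolo11m-seg.pt", "1_U7fgSdK8ydWiWB2MJbN4hxcAc1x78b7"),
  ("yolo11l-seg.pt", "14uOrXi_1kmnTn-rWUXaVI1w20UdvjDID"),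
  ("yolo11x-seg.pt", "1USVdODYo7_5bgik74-20tAhFWCdWM9Xm"),
  ("yolo11n-pose.pt", "1pJDTaHdbiJO_uHLeIDpwJt9WFfASsai9"),
  ("yolo11s-pose.pt", "1q4_hWMm0wMfQX4UsfDku80_tUyVjS9Gg"),
  ("yolo11m-pose.pt", "1LkUAZsyN8H1UsB51AWMJwUrEqjVTxS_8"),
  ("yolo11l-pose.pt", "1rWar9FvvI4KtYnFdGZT8FWu2hoF_Yzc9"),
  ("yolo11x-pose.pt", "1kgcjABj-QUl9eJbtYnNDwcDGoq5kGTLO")]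

def pvModelsByTask : PySem.Dict String (List String) := PySem.Dict.ofList [
  ("detect", ["yolo11n", "yolo11s", "yolo11m", "yolo11l", "yolo11x"]),
  ("segment", ["yolo11n-seg", "yolo11s-seg", "yolo11m-seg", "yolo11l-seg", "yolo11x-seg"]),
  ("pose", ["yolo11n-pose", "yolo11s-pose", "yolo11m-pose", "yolo11l-pose", "yolo11x-pose"])]

def pvModelsBySize : PySem.Dict String (List String) := PySem.Dict.ofList [
  ("n", ["yolo11n", "yolo11n-seg", "yolo11n-pose"]),
  ("s", ["yolo11s", "yolo11s-seg", "yolo11s-pose"]),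
  ("m", ["yolo11m", "yolo11m-seg", "yolo11m-pose"]),
  ("l", ["yolo11l", "yolo11l-seg", "yolo11l-pose"]),
  ("x", ["yolo11x", "yolo11x-seg", "yolo11x-pose"])]

-- Python truthiness of an optional list: None and [] are falsy
def pvFalsy (o : Option (List String)) : Bool := (o.getD []).isEmpty

def get_models_to_download (sizes : Option (List String)) (tasks : Option (List String)) : List String :=
  let models : PySem.Set String := PySem.Set.empty
  -- if not sizes and not tasks: return [m.replace(".pt", "") for m in WEIGHT_FILES.keys()]
  if pvFalsy sizes && pvFalsy tasks then
    pvWeightFiles.keys.map (fun m => PySem.Str.replace m ".pt" "")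
  else
    -- if sizes: for size in sizes: models.update(MODELS_BY_SIZE.get(size, []))
    let models :=
      if !pvFalsy sizes then
        (sizes.getD []).foldl (fun s size => PySem.Set.update s (pvModelsBySize.getD size [])) models
      else models
    -- if tasks: …
    if !pvFalsy tasks then
      let task_models :=
        (tasks.getD []).foldl (fun s task => PySem.Set.update s (pvModelsByTask.getD task [])) PySem.Set.empty
      let models := if !pvFalsy sizes then PySem.Set.inter models task_models else task_models
      PySem.List.sorted models (fun x => x) false
    else
      PySem.List.sorted models (fun x => x) false

-- ===== PORT B =====
def pvTaskOf (name : String) : String :=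
  if PySem.Str.endswith name "-seg" then "segment"
  else if PySem.Str.endswith name "-pose" then "pose"
  else "detect"

def get_models_to_download_alt (sizes : Option (List String)) (tasks : Option (List String)) : List String :=
  let names := pvWeightFiles.keys.map (fun k => PySem.Str.slice k none (some (-3)))
  if pvFalsy sizes && pvFalsy tasks then names
  else
    let picked := names.filter (fun n =>
      (pvFalsy sizes || (sizes.getD []).contains (PySem.Str.slice n (some 6) (some 7))) &&
      (pvFalsy tasks || (tasks.getD []).contains (pvTaskOf n)))
    PySem.List.sorted picked (fun x => x) false

-- ===== PRECONDITION & SPEC =====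
def Spec_get_models_to_download (sizes : Option (List String)) (tasks : Option (List String)) (out : List String) : Prop := out = get_models_to_download_alt sizes tasks
instance (sizes : Option (List String)) (tasks : Option (List String)) (out : List String) : Decidable (Spec_get_models_to_download sizes tasks out) := by unfold Spec_get_models_to_download; infer_instance

-- ===== CLAIM (what is proved, stated in full; the proofs are below) =====
def Claim_equal_get_models_to_download : Prop := ∀ (sizes : Option (List String)) (tasks : Option (List String)), Dom_get_models_to_download sizes tasks → Spec_get_models_to_download sizes tasks (get_models_to_download sizes tasks)

-- ===== LEMMAS AND PROOFS =====

-- the stripped model names, in WEIGHT_FILES order (the value both ports' `names` evaluate to)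
def pvNames : List String :=
  ["yolo11n", "yolo11s", "yolo11m", "yolo11l", "yolo11x",
   "yolo11n-seg", "yolo11s-seg", "yolo11m-seg", "yolo11l-seg", "yolo11x-seg",
   "yolo11n-pose", "yolo11s-pose", "yolo11m-pose", "yolo11l-pose", "yolo11x-pose"]

lemma mem_foldl_update (y : String) (l : List String) (f : String → List String) (s : PySem.Set String) :
    y ∈ l.foldl (fun s b => PySem.Set.update s (f b)) s ↔ y ∈ s ∨ ∃ b ∈ l, y ∈ f b := by
  induction l generalizing s with
  | nil => simp
  | cons a t ih =>
    simp [List.foldl_cons, ih, PySem.Set.mem_update]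
    tauto

lemma nodup_foldl_update (l : List String) (f : String → List String) (s : PySem.Set String)
    (hs : s.Nodup) : (l.foldl (fun s b => PySem.Set.update s (f b)) s).Nodup := by
  induction l generalizing s with
  | nil => exact hs
  | cons a t ih => exact ih _ (PySem.Set.nodup_update _ _ hs)

lemma getD_size (b : String) :
    pvModelsBySize.getD b [] =
      if b = "n" then ["yolo11n", "yolo11n-seg", "yolo11n-pose"]
      else if b = "s" then ["yolo11s", "yolo11s-seg", "yolo11s-pose"]
      else if b = "m" then ["yolo11m", "yolo11m-seg", "yolo11m-pose"]
      else if b = "l" then ["yolo11l", "yolo11l-seg", "yolo11l-pose"]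
      else if b = "x" then ["yolo11x", "yolo11x-seg", "yolo11x-pose"]
      else [] := by
  have hit : pvModelsBySize.items =
      [("n", ["yolo11n", "yolo11n-seg", "yolo11n-pose"]),
       ("s", ["yolo11s", "yolo11s-seg", "yolo11s-pose"]),
       ("m", ["yolo11m", "yolo11m-seg", "yolo11m-pose"]),
       ("l", ["yolo11l", "yolo11l-seg", "yolo11l-pose"]),
       ("x", ["yolo11x", "yolo11x-seg", "yolo11x-pose"])] := by decide
  split_ifs with h1 h2 h3 h4 h5
  · subst h1; decide
  · subst h2; decide
  · subst h3; decide
  · subst h4; decide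
  · subst h5; decide
  · have h1' : ("n" : String) ≠ b := fun e => h1 e.symm
    have h2' : ("s" : String) ≠ b := fun e => h2 e.symm
    have h3' : ("m" : String) ≠ b := fun e => h3 e.symm
    have h4' : ("l" : String) ≠ b := fun e => h4 e.symm
    have h5' : ("x" : String) ≠ b := fun e => h5 e.symm
    simp [PySem.Dict.getD, PySem.Dict.get?, hit, beq_iff_eq,
          h1', h2', h3', h4', h5']

lemma getD_task (b : String) :
    pvModelsByTask.getD b [] =
      if b = "detect" then ["yolo11n", "yolo11s", "yolo11m", "yolo11l", "yolo11x"]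
      else if b = "segment" then ["yolo11n-seg", "yolo11s-seg", "yolo11m-seg", "yolo11l-seg", "yolo11x-seg"]
      else if b = "pose" then ["yolo11n-pose", "yolo11s-pose", "yolo11m-pose", "yolo11l-pose", "yolo11x-pose"]
      else [] := by
  have hit : pvModelsByTask.items =
      [("detect", ["yolo11n", "yolo11s", "yolo11m", "yolo11l", "yolo11x"]),
       ("segment", ["yolo11n-seg", "yolo11s-seg", "yolo11m-seg", "yolo11l-seg", "yolo11x-seg"]),
       ("pose", ["yolo11n-pose", "yolo11s-pose", "yolo11m-pose", "yolo11l-pose", "yolo11x-pose"])] := by decide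
  split_ifs with h1 h2 h3
  · subst h1; decide
  · subst h2; decide
  · subst h3; decide
  · have h1' : ("detect" : String) ≠ b := fun e => h1 e.symm
    have h2' : ("segment" : String) ≠ b := fun e => h2 e.symm
    have h3' : ("pose" : String) ≠ b := fun e => h3 e.symm
    simp [PySem.Dict.getD, PySem.Dict.get?, hit, beq_iff_eq, h1', h2', h3']

lemma mem_size_table (y b : String) :
    y ∈ pvModelsBySize.getD b [] ↔
      y ∈ pvNames ∧ b = PySem.Str.slice y (some 6) (some 7) := by
  rw [getD_size]
  split_ifs with h1 h2 h3 h4 h5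
  case pos => subst h1; constructor
              · intro hy; fin_cases hy <;> exact ⟨by decide, by decide⟩
              · rintro ⟨hy, hb⟩; fin_cases hy <;> revert hb <;> decide
  case pos => subst h2; constructor
              · intro hy; fin_cases hy <;> exact ⟨by decide, by decide⟩
              · rintro ⟨hy, hb⟩; fin_cases hy <;> revert hb <;> decide
  case pos => subst h3; constructor
              · intro hy; fin_cases hy <;> exact ⟨by decide, by decide⟩
              · rintro ⟨hy, hb⟩; fin_cases hy <;> revert hb <;> decide
  case pos => subst h4; constructor
              · intro hy; fin_cases hy <;> exact ⟨by decide, by decide⟩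
              · rintro ⟨hy, hb⟩; fin_cases hy <;> revert hb <;> decide
  case pos => subst h5; constructor
              · intro hy; fin_cases hy <;> exact ⟨by decide, by decide⟩
              · rintro ⟨hy, hb⟩; fin_cases hy <;> revert hb <;> decide
  case neg =>
    simp only [List.not_mem_nil, false_iff, not_and]
    intro hy hb
    subst hb
    fin_cases hy <;>
      first
        | exact h1 (by decide)
        | exact h2 (by decide)
        | exact h3 (by decide)
        | exact h4 (by decide)
        | exact h5 (by decide)

lemma mem_task_table (y b : String) :
    y ∈ pvModelsByTask.getD b [] ↔ y ∈ pvNames ∧ b = pvTaskOf y := by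
  rw [getD_task]
  split_ifs with h1 h2 h3
  case pos => subst h1; constructor
              · intro hy; fin_cases hy <;> exact ⟨by decide, by decide⟩
              · rintro ⟨hy, hb⟩; fin_cases hy <;> revert hb <;> decide
  case pos => subst h2; constructor
              · intro hy; fin_cases hy <;> exact ⟨by decide, by decide⟩
              · rintro ⟨hy, hb⟩; fin_cases hy <;> revert hb <;> decide
  case pos => subst h3; constructor
              · intro hy; fin_cases hy <;> exact ⟨by decide, by decide⟩
              · rintro ⟨hy, hb⟩; fin_cases hy <;> revert hb <;> decide
  case neg =>
    simp only [List.not_mem_nil, false_iff, not_and]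
    intro hy hb
    subst hb
    fin_cases hy <;>
      first
        | exact h1 (by decide)
        | exact h2 (by decide)
        | exact h3 (by decide)

-- membership in A's size-union / task-union loop, characterised by the parsed name
lemma memA_size (y : String) (l : List String) :
    (y ∈ l.foldl (fun s b => PySem.Set.update s (pvModelsBySize.getD b [])) ([] : PySem.Set String)) ↔
      y ∈ pvNames ∧ PySem.Str.slice y (some 6) (some 7) ∈ l := by
  rw [mem_foldl_update]
  constructor
  · rintro (h | ⟨b, hb, hy⟩)
    · exact absurd h (List.not_mem_nil)
    · obtain ⟨hn, rfl⟩ := (mem_size_table y b).mp hy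
      exact ⟨hn, hb⟩
  · rintro ⟨hn, hl⟩
    exact Or.inr ⟨_, hl, (mem_size_table y _).mpr ⟨hn, rfl⟩⟩

lemma memA_task (y : String) (l : List String) :
    (y ∈ l.foldl (fun s b => PySem.Set.update s (pvModelsByTask.getD b [])) ([] : PySem.Set String)) ↔
      y ∈ pvNames ∧ pvTaskOf y ∈ l := by
  rw [mem_foldl_update]
  constructor
  · rintro (h | ⟨b, hb, hy⟩)
    · exact absurd h (List.not_mem_nil)
    · obtain ⟨hn, rfl⟩ := (mem_task_table y b).mp hy
      exact ⟨hn, hb⟩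
  · rintro ⟨hn, hl⟩
    exact Or.inr ⟨_, hl, (mem_task_table y _).mpr ⟨hn, rfl⟩⟩

lemma names_eval :
    pvWeightFiles.keys.map (fun k => PySem.Str.slice k none (some (-3))) = pvNames := by decide

lemma nodup_pvNames : pvNames.Nodup := by decide

-- ===== VERDICT (by name: the statement is the Claim_ definition above) =====
theorem get_models_to_download_spec : Claim_equal_get_models_to_download := by
  intro sizes tasks _
  show get_models_to_download sizes tasks = get_models_to_download_alt sizes tasks
  cases hs : pvFalsy sizes <;> cases ht : pvFalsy tasks <;>
    simp only [get_models_to_download, get_models_to_download_alt, hs, ht, names_eval,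
      Bool.true_and, Bool.and_true, Bool.and_false, Bool.not_true,
      Bool.not_false, Bool.true_or, Bool.false_or,
      Bool.false_eq_true, reduceIte, PySem.Set.empty]
  -- sizes truthy, tasks truthy: intersection case
  · apply PySem.List.sorted_eq_sorted_of_perm _ _ _ (fun _ _ h => h)
    refine (List.perm_ext_iff_of_nodup ?_ ?_).mpr ?_
    · exact PySem.Set.nodup_inter _ _ (nodup_foldl_update _ _ _ List.nodup_nil)
    · exact nodup_pvNames.filter _
    intro y
    rw [PySem.Set.mem_inter, memA_size, memA_task, List.mem_filter]
    simp only [Bool.and_eq_true, List.contains_iff_mem]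
    tauto
  -- sizes truthy, tasks falsy
  · apply PySem.List.sorted_eq_sorted_of_perm _ _ _ (fun _ _ h => h)
    refine (List.perm_ext_iff_of_nodup (nodup_foldl_update _ _ _ List.nodup_nil)
      (nodup_pvNames.filter _)).mpr ?_
    intro y
    rw [memA_size, List.mem_filter]
    simp only [List.contains_iff_mem]
  -- sizes falsy, tasks truthy
  · apply PySem.List.sorted_eq_sorted_of_perm _ _ _ (fun _ _ h => h)
    refine (List.perm_ext_iff_of_nodup (nodup_foldl_update _ _ _ List.nodup_nil)
      (nodup_pvNames.filter _)).mpr ?_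
    intro y
    rw [memA_task, List.mem_filter]
    simp only [List.contains_iff_mem]
  -- both falsy
  · decide
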